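-- pv_equiv track=rewrite | github.com/Gunact2910/Driver | keyboard_dashboard_app.py | parse_status_output
-- ===== SOURCE A (Python) =====
-- def parse_status_output(raw_output: str) -> list[dict[str, str]]:
--     devices: list[dict[str, str]] = []
--     current: dict[str, str] = {}
--
--     for raw_line in raw_output.splitlines():
--         line = raw_line.strip()
--         if not line:
--             if current:
--                 devices.append(current)
--                 current = {}
--             continue
--
--         if line.startswith("Interface :"):
--             current["interface"] = line.split(":", 1)[1].strip()
--         elif line.startswith("USB device :"):
--             current["usb_device"] = line.split(":", 1)[1].strip()
--         elif line.startswith("Vendor:Prod:"):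
--             current["vendor_product"] = line.split(":", 1)[1].strip()
--         elif line.startswith("Device    :"):
--             current["device"] = line.split(":", 1)[1].strip()
--         elif line.startswith("Driver    :"):
--             current["driver"] = line.split(":", 1)[1].strip()
--
--     if current:
--         devices.append(current)
--     return devices
-- ===== SOURCE B (Python) =====
-- FIELDS = [
--     ("Interface :", "interface"),
--     ("USB device :", "usb_device"),
--     ("Vendor:Prod:", "vendor_product"),
--     ("Device    :", "device"),
--     ("Driver    :", "driver"),
-- ]
--
--
-- def parse_status_output(raw_output: str) -> list[dict[str, str]]:
--     # Pass 1: split the stripped lines into blank-separated groups.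
--     done: list[list[str]] = []
--     cur: list[str] = []
--     for raw_line in raw_output.splitlines():
--         line = raw_line.strip()
--         if line:
--             cur.append(line)
--         else:
--             done.append(cur)
--             cur = []
--     done.append(cur)
--
--     # Pass 2: table-driven conversion of each group; drop groups yielding no fields.
--     devices: list[dict[str, str]] = []
--     for group in done:
--         d: dict[str, str] = {}
--         for line in group:
--             m = next((pk for pk in FIELDS if line.startswith(pk[0])), None)
--             if m is not None:
--                 d[m[1]] = line.split(":", 1)[1].strip()
--         if d:
--             devices.append(d)
--     return devices
-- ===== Notes on version B (the rewrite author's own statement) =====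
-- stated objective: alternative
-- what changed: Replaces A's single fused loop with an if/elif prefix chain by a two-pass decomposition: first group stripped lines into blank-separated blocks, then convert each block via a prefix-to-field lookup table, keeping only blocks that yield at least one field.
import Mathlib
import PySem

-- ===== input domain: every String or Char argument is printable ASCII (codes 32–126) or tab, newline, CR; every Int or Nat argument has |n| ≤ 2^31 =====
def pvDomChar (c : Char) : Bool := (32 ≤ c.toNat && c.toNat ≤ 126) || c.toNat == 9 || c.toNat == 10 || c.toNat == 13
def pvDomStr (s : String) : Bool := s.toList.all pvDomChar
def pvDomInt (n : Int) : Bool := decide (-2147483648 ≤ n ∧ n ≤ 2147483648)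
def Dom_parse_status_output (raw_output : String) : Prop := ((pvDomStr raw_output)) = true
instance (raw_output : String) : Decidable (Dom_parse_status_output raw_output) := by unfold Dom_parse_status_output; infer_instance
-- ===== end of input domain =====

-- B replaces A's fused loop + if/elif chain by a two-pass decomposition (group blank-separated
-- blocks first, then a table-driven conversion of each block); same cost, proved equal everywhere.

-- ===== PORT A =====

-- line.split(":", 1)[1].strip()  (both Pythons contain this exact expression)
def pvVal (line : String) : String :=
  PySem.Str.strip ((PySem.List.pyGet? ((PySem.Str.splitMax? line ":" 1).getD []) 1).getD "")

-- the if/elif chain of A's loop body (non-blank case)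
def pvAssignA (cur : PySem.Dict String String) (line : String) : PySem.Dict String String :=
  if PySem.Str.startswith line "Interface :" then cur.insert "interface" (pvVal line)
  else if PySem.Str.startswith line "USB device :" then cur.insert "usb_device" (pvVal line)
  else if PySem.Str.startswith line "Vendor:Prod:" then cur.insert "vendor_product" (pvVal line)
  else if PySem.Str.startswith line "Device    :" then cur.insert "device" (pvVal line)
  else if PySem.Str.startswith line "Driver    :" then cur.insert "driver" (pvVal line)
  else cur

def pvStepA (s : List (List (String × String)) × PySem.Dict String String) (raw_line : String) :
    List (List (String × String)) × PySem.Dict String String :=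
  let line := PySem.Str.strip raw_line
  if line = "" then
    if s.2.items ≠ [] then (s.1 ++ [s.2.items], PySem.Dict.empty) else s
  else
    (s.1, pvAssignA s.2 line)

def parse_status_output (raw_output : String) : List (List (String × String)) :=
  let s := (PySem.Str.splitlines raw_output).foldl pvStepA ([], PySem.Dict.empty)
  if s.2.items ≠ [] then s.1 ++ [s.2.items] else s.1

-- ===== PORT B =====

def pvFields : List (String × String) :=
  [("Interface :", "interface"), ("USB device :", "usb_device"),
   ("Vendor:Prod:", "vendor_product"), ("Device    :", "device"), ("Driver    :", "driver")]

-- pass 1: group stripped non-blank lines into blank-separated blocks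
def pvStepG (s : List (List String) × List String) (raw_line : String) :
    List (List String) × List String :=
  let line := PySem.Str.strip raw_line
  if line ≠ "" then (s.1, s.2 ++ [line]) else (s.1 ++ [s.2], [])

-- pass 2, inner: one line of a group, via the prefix table
def pvLineStep (d : PySem.Dict String String) (line : String) : PySem.Dict String String :=
  match pvFields.find? (fun pk => PySem.Str.startswith line pk.1) with
  | some pk => d.insert pk.2 (pvVal line)
  | none => d

def pvGroupDict (g : List String) : PySem.Dict String String :=
  g.foldl pvLineStep PySem.Dict.empty

def parse_status_output_alt (raw_output : String) : List (List (String × String)) :=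
  let p := (PySem.Str.splitlines raw_output).foldl pvStepG ([], [])
  (p.1 ++ [p.2]).foldl
    (fun devs g => let d := pvGroupDict g; if d.items ≠ [] then devs ++ [d.items] else devs) []

-- ===== PRECONDITION & SPEC =====
def Spec_parse_status_output (raw_output : String) (out : List (List (String × String))) : Prop := out = parse_status_output_alt raw_output
instance (raw_output : String) (out : List (List (String × String))) : Decidable (Spec_parse_status_output raw_output out) := by unfold Spec_parse_status_output; infer_instance

-- ===== CLAIM (what is proved, stated in full; the proofs are below) =====
def Claim_equal_parse_status_output : Prop := ∀ (raw_output : String), Dom_parse_status_output raw_output → Spec_parse_status_output raw_output (parse_status_output raw_output)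

-- ===== LEMMAS AND PROOFS =====

-- A's elif chain and B's table lookup agree
lemma pvAssignA_eq (d : PySem.Dict String String) (line : String) :
    pvAssignA d line = pvLineStep d line := by
  simp only [pvAssignA, pvLineStep, pvFields, List.find?]
  split_ifs <;> simp_all

-- A's final flush
def pvFinishA (s : List (List (String × String)) × PySem.Dict String String) :
    List (List (String × String)) :=
  if s.2.items ≠ [] then s.1 ++ [s.2.items] else s.1

-- B's second pass, recursively
def pvProcB : List (List String) → List (List (String × String))
  | [] => []
  | g :: t => if (pvGroupDict g).items ≠ [] then (pvGroupDict g).items :: pvProcB t else pvProcB t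

lemma pvFoldB_eq (gs : List (List String)) (acc : List (List (String × String))) :
    gs.foldl (fun devs g => let d := pvGroupDict g;
      if d.items ≠ [] then devs ++ [d.items] else devs) acc = acc ++ pvProcB gs := by
  induction gs generalizing acc with
  | nil => simp [pvProcB]
  | cons g t ih =>
      rw [List.foldl_cons, ih]
      by_cases h : (pvGroupDict g).items = [] <;> simp [pvProcB, h]

lemma pvStepA_blank (s : List (List (String × String)) × PySem.Dict String String)
    {l : String} (h : PySem.Str.strip l = "") :
    pvStepA s l = if s.2.items ≠ [] then (s.1 ++ [s.2.items], PySem.Dict.empty) else s := by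
  simp [pvStepA, h]

lemma pvStepA_line (s : List (List (String × String)) × PySem.Dict String String)
    {l : String} (h : PySem.Str.strip l ≠ "") :
    pvStepA s l = (s.1, pvAssignA s.2 (PySem.Str.strip l)) := by
  simp [pvStepA, h]

lemma pvStepG_blank (s : List (List String) × List String) {l : String}
    (h : PySem.Str.strip l = "") : pvStepG s l = (s.1 ++ [s.2], []) := by
  simp [pvStepG, h]

lemma pvStepG_line (s : List (List String) × List String) {l : String}
    (h : PySem.Str.strip l ≠ "") : pvStepG s l = (s.1, s.2 ++ [PySem.Str.strip l]) := by
  simp [pvStepG, h]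

-- the finished-groups component of pass 1 is append-only
lemma pvStepG_fst (ls : List String) (d : List (List String)) (c : List String) :
    ls.foldl pvStepG (d, c) =
      (d ++ (ls.foldl pvStepG ([], c)).1, (ls.foldl pvStepG ([], c)).2) := by
  induction ls generalizing d c with
  | nil => simp
  | cons l t ih =>
      by_cases h : PySem.Str.strip l = ""
      · rw [List.foldl_cons, List.foldl_cons, pvStepG_blank _ h, pvStepG_blank _ h]
        rw [ih (d ++ [c]) [], ih ([] ++ [c]) []]
        simp
      · rw [List.foldl_cons, List.foldl_cons, pvStepG_line _ h, pvStepG_line _ h]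
        exact ih d (c ++ [PySem.Str.strip l])

lemma pvGroupDict_empty_of_items_nil {g : List String} (h : (pvGroupDict g).items = []) :
    pvGroupDict g = PySem.Dict.empty := by
  apply PySem.Dict.ext; simpa using h

-- main invariant: A's loop from a state matching a pending group g equals B's two passes
lemma pv_main (ls : List String) (devs : List (List (String × String))) (g : List String) :
    pvFinishA (ls.foldl pvStepA (devs, pvGroupDict g)) =
      devs ++ pvProcB ((ls.foldl pvStepG ([], g)).1 ++ [(ls.foldl pvStepG ([], g)).2]) := by
  induction ls generalizing devs g with
  | nil =>
      by_cases h : (pvGroupDict g).items = [] <;>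
        simp [pvFinishA, pvProcB, h]
  | cons l t ih =>
      rw [List.foldl_cons, List.foldl_cons]
      by_cases hb : PySem.Str.strip l = ""
      · rw [pvStepA_blank _ hb, pvStepG_blank _ hb]
        by_cases hnil : (pvGroupDict g).items = []
        · rw [if_neg (by simpa using hnil), pvGroupDict_empty_of_items_nil hnil,
            show (PySem.Dict.empty : PySem.Dict String String) = pvGroupDict [] from rfl,
            ih devs [], pvStepG_fst t ([] ++ [g]) []]
          simp [pvProcB, hnil]
        · rw [if_pos (by simpa using hnil),
            show (PySem.Dict.empty : PySem.Dict String String) = pvGroupDict [] from rfl,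
            ih (devs ++ [(pvGroupDict g).items]) [], pvStepG_fst t ([] ++ [g]) []]
          simp [pvProcB, hnil]
      · rw [pvStepA_line _ hb, pvStepG_line _ hb]
        have hg : pvAssignA (pvGroupDict g) (PySem.Str.strip l)
            = pvGroupDict (g ++ [PySem.Str.strip l]) := by
          rw [pvAssignA_eq]; simp [pvGroupDict]
        rw [hg]; exact ih devs (g ++ [PySem.Str.strip l])

-- ===== VERDICT (by name: the statement is the Claim_ definition above) =====
theorem parse_status_output_spec : Claim_equal_parse_status_output := by
  intro raw _
  show _ = _
  rw [parse_status_output, parse_status_output_alt, pvFoldB_eq]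
  have h := pv_main (PySem.Str.splitlines raw) [] []
  simpa [pvFinishA, pvGroupDict] using h
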